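-- pv_equiv track=rewrite | github.com/MentalVibez/ai-agent-orchestrator | app/agents/system_monitoring.py | _identify_monitoring_type
-- ===== SOURCE A (Python) =====
-- def _identify_monitoring_type(task: str) -> str:
--     """Identify the type of system monitoring needed."""
--     task_lower = task.lower()
--     if any(keyword in task_lower for keyword in ["cpu", "processor", "load"]):
--         return "cpu_monitoring"
--     elif any(keyword in task_lower for keyword in ["memory", "ram", "swap", "oom"]):
--         return "memory_monitoring"
--     elif any(keyword in task_lower for keyword in ["disk", "storage", "space", "inode"]):
--         return "disk_monitoring"
--     elif any(keyword in task_lower for keyword in ["process", "service", "application", "pid"]):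
--         return "process_monitoring"
--     elif any(keyword in task_lower for keyword in ["health", "status", "overall"]):
--         return "system_health"
--     else:
--         return "general_monitoring"
-- ===== SOURCE B (Python) =====
-- _FLAT_PRIORITY = (
--     ("cpu", 0), ("processor", 0), ("load", 0),
--     ("memory", 1), ("ram", 1), ("swap", 1), ("oom", 1),
--     ("disk", 2), ("storage", 2), ("space", 2), ("inode", 2),
--     ("process", 3), ("service", 3), ("application", 3), ("pid", 3),
--     ("health", 4), ("status", 4), ("overall", 4),
-- )
-- _LABELS = ("cpu_monitoring", "memory_monitoring", "disk_monitoring",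
--            "process_monitoring", "system_health", "general_monitoring")
--
-- def _identify_monitoring_type(task: str) -> str:
--     """Identify the type of system monitoring needed."""
--     t = task.lower()
--     best = 5
--     for i in range(len(t)):
--         for kw, pri in _FLAT_PRIORITY:
--             if pri < best and t.startswith(kw, i):
--                 best = pri
--     return _LABELS[best]
-- ===== Notes on version B (the rewrite author's own statement) =====
-- stated objective: alternative
-- what changed: Replaced the five-branch if/elif ladder of full-string substring searches by a single character-position sweep over the lowered string that keeps a best-priority accumulator against a flat keyword-to-priority map, then indexes a label table with the final minimum.
import Mathlib
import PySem

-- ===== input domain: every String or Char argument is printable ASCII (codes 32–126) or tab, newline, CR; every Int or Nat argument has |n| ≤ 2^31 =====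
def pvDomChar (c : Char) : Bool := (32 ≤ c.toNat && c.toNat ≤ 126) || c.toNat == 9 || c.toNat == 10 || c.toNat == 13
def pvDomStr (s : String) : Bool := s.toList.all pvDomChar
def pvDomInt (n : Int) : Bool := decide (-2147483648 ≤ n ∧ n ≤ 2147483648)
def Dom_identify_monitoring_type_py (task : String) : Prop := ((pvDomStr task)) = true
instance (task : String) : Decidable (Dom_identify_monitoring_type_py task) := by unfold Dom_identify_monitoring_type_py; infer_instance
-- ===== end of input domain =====

-- B replaces A's if/elif ladder of whole-string substring searches by a single character-position
-- sweep keeping a best-priority accumulator over a flat keyword->priority map (alternative; not faster).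


-- ===== PORT A =====
def identify_monitoring_type_py (task : String) : String :=
  let task_lower := PySem.Str.lower task
  if ["cpu", "processor", "load"].any (fun k => PySem.Str.isIn k task_lower) then
    "cpu_monitoring"
  else if ["memory", "ram", "swap", "oom"].any (fun k => PySem.Str.isIn k task_lower) then
    "memory_monitoring"
  else if ["disk", "storage", "space", "inode"].any (fun k => PySem.Str.isIn k task_lower) then
    "disk_monitoring"
  else if ["process", "service", "application", "pid"].any (fun k => PySem.Str.isIn k task_lower) then
    "process_monitoring"
  else if ["health", "status", "overall"].any (fun k => PySem.Str.isIn k task_lower) then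
    "system_health"
  else
    "general_monitoring"

-- ===== PORT B =====
-- _FLAT_PRIORITY: keywords as code-point lists (t.startswith(kw, i) is exact as Chars.startswith on t.drop i, 0 ≤ i)
def pvFlat : List (List Char × Nat) :=
  [("cpu".toList, 0), ("processor".toList, 0), ("load".toList, 0),
   ("memory".toList, 1), ("ram".toList, 1), ("swap".toList, 1), ("oom".toList, 1),
   ("disk".toList, 2), ("storage".toList, 2), ("space".toList, 2), ("inode".toList, 2),
   ("process".toList, 3), ("service".toList, 3), ("application".toList, 3), ("pid".toList, 3),
   ("health".toList, 4), ("status".toList, 4), ("overall".toList, 4)]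

def pvLabels : List String :=
  ["cpu_monitoring", "memory_monitoring", "disk_monitoring",
   "process_monitoring", "system_health", "general_monitoring"]

def identify_monitoring_type_py_alt (task : String) : String :=
  let t := (PySem.Str.lower task).toList
  let best := (List.range t.length).foldl
    (fun b i => pvFlat.foldl
      (fun b p => if p.2 < b ∧ PySem.Chars.startswith (t.drop i) p.1 then p.2 else b) b) 5
  -- _LABELS[best]: best ≤ 5 always holds, so the getD default is unreachable
  pvLabels.getD best "general_monitoring"

-- ===== PRECONDITION & SPEC =====
def Spec_identify_monitoring_type_py (task : String) (out : String) : Prop := out = identify_monitoring_type_py_alt task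
instance (task : String) (out : String) : Decidable (Spec_identify_monitoring_type_py task out) := by unfold Spec_identify_monitoring_type_py; infer_instance

-- ===== CLAIM (what is proved, stated in full; the proofs are below) =====
def Claim_equal_identify_monitoring_type_py : Prop := ∀ (task : String), Dom_identify_monitoring_type_py task → Spec_identify_monitoring_type_py task (identify_monitoring_type_py task)

-- ===== LEMMAS AND PROOFS =====

-- the conditional-min fold: result ≤ start, is the start or the value of some passing element, and is ≤ every passing value
theorem pvCondminSpec {α : Type} (c : α → Bool) (v : α → Nat) :
    ∀ (l : List α) (b0 : Nat),
    (l.foldl (fun b x => if v x < b ∧ c x then v x else b) b0) ≤ b0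
    ∧ ((l.foldl (fun b x => if v x < b ∧ c x then v x else b) b0) = b0
        ∨ ∃ x ∈ l, c x = true ∧ v x = (l.foldl (fun b x => if v x < b ∧ c x then v x else b) b0))
    ∧ ∀ x ∈ l, c x = true → (l.foldl (fun b x => if v x < b ∧ c x then v x else b) b0) ≤ v x := by
  intro l
  induction l with
  | nil => intro b0; simp
  | cons x xs ih =>
    intro b0
    simp only [List.foldl_cons]
    by_cases hx : v x < b0 ∧ c x
    · rw [if_pos hx]
      obtain ⟨h1, h2, h3⟩ := ih (v x)
      refine ⟨by omega, ?_, ?_⟩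
      · rcases h2 with h2 | ⟨y, hy, hcy, hvy⟩
        · right; exact ⟨x, List.mem_cons_self, hx.2, h2.symm⟩
        · right; exact ⟨y, List.mem_cons_of_mem _ hy, hcy, hvy⟩
      · intro y hy hcy
        rcases List.mem_cons.mp hy with rfl | hy'
        · omega
        · exact h3 y hy' hcy
    · rw [if_neg hx]
      obtain ⟨h1, h2, h3⟩ := ih b0
      refine ⟨h1, ?_, ?_⟩
      · rcases h2 with h2 | ⟨y, hy, hcy, hvy⟩
        · left; exact h2
        · right; exact ⟨y, List.mem_cons_of_mem _ hy, hcy, hvy⟩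
      · intro y hy hcy
        rcases List.mem_cons.mp hy with rfl | hy'
        · have : ¬ v y < b0 := fun h => hx ⟨h, hcy⟩
          omega
        · exact h3 y hy' hcy

-- flatten a nested foldl
theorem pvFoldlFoldl {ι α β : Type} (f : ι → List α) (g : β → α → β) :
    ∀ (l : List ι) (b0 : β),
    l.foldl (fun b i => (f i).foldl g b) b0 = (l.flatMap f).foldl g b0 := by
  intro l
  induction l with
  | nil => intro b0; simp
  | cons i is ih => intro b0; simp [List.foldl_append, ih]

-- a nonempty keyword occurs as a substring iff it starts at some position i < length
theorem pvKwBridge (kw : List Char) (hk : kw ≠ []) (t : List Char) :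
    (∃ i < t.length, PySem.Chars.startswith (t.drop i) kw = true)
      ↔ PySem.Chars.isIn kw t = true := by
  rw [← PySem.Chars.exists_prefix_drop_iff_isIn]
  constructor
  · rintro ⟨i, _, h⟩
    exact ⟨i, (PySem.Chars.startswith_iff _ _).mp h⟩
  · rintro ⟨j, hj⟩
    by_cases hjl : j < t.length
    · exact ⟨j, hjl, (PySem.Chars.startswith_iff _ _).mpr hj⟩
    · exfalso
      rw [List.drop_eq_nil_of_le (by omega)] at hj
      exact hk (List.prefix_nil.mp hj)

set_option maxHeartbeats 1000000 in
theorem identify_monitoring_type_py_alt_eq (task : String) :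
    identify_monitoring_type_py_alt task = identify_monitoring_type_py task := by
  unfold identify_monitoring_type_py identify_monitoring_type_py_alt
  dsimp only
  set tl := PySem.Str.lower task with htl
  set t := tl.toList with ht
  -- rewrite the nested fold into a single conditional-min fold over position × entry pairs
  have hsw : ∀ (kw : String), PySem.Str.isIn kw tl = PySem.Chars.isIn kw.toList t := by
    intro kw; rw [ht]; simp [PySem.Str.isIn_eq]
  have hflat :
      (List.range t.length).foldl
        (fun b i => pvFlat.foldl
          (fun b p => if p.2 < b ∧ PySem.Chars.startswith (t.drop i) p.1 then p.2 else b) b) 5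
      = ((List.range t.length).flatMap (fun i => pvFlat.map (fun p => (i, p)))).foldl
          (fun b (q : Nat × List Char × Nat) =>
            if q.2.2 < b ∧ PySem.Chars.startswith (t.drop q.1) q.2.1 then q.2.2 else b) 5 := by
    have h1 : ∀ (b i : Nat),
        pvFlat.foldl (fun b p => if p.2 < b ∧ PySem.Chars.startswith (t.drop i) p.1 then p.2 else b) b
        = (pvFlat.map (fun p => (i, p))).foldl
            (fun b (q : Nat × List Char × Nat) =>
              if q.2.2 < b ∧ PySem.Chars.startswith (t.drop q.1) q.2.1 then q.2.2 else b) b := by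
      intro b i; rw [List.foldl_map]
    simp only [h1]
    exact pvFoldlFoldl _ _ _ _
  rw [hflat]
  set pairs := (List.range t.length).flatMap (fun i => pvFlat.map (fun p => (i, p))) with hpairs
  set m := pairs.foldl
      (fun b (q : Nat × List Char × Nat) =>
        if q.2.2 < b ∧ PySem.Chars.startswith (t.drop q.1) q.2.1 then q.2.2 else b) 5 with hm
  obtain ⟨hle, hval, hmin⟩ :=
    pvCondminSpec (fun q : Nat × List Char × Nat => PySem.Chars.startswith (t.drop q.1) q.2.1)
      (fun q : Nat × List Char × Nat => q.2.2) pairs 5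
  rw [← hm] at hle hval hmin
  -- membership characterization
  have hmem : ∀ (q : Nat × List Char × Nat), q ∈ pairs ↔ q.1 < t.length ∧ q.2 ∈ pvFlat := by
    rintro ⟨i, p⟩
    simp [hpairs, List.mem_flatMap, List.mem_range]
  -- matched g ↔ group-any (per group)
  have hmatch : ∀ g : Nat, g < 5 →
      ((∃ q ∈ pairs, PySem.Chars.startswith (t.drop q.1) q.2.1 = true ∧ q.2.2 = g)
        ↔ ∃ kw ∈ pvFlat.filter (fun p => p.2 = g), PySem.Chars.isIn kw.1 t = true) := by
    intro g hg
    constructor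
    · rintro ⟨⟨i, p⟩, hq, hc, hv⟩
      obtain ⟨hi, hp⟩ := (hmem _).mp hq
      refine ⟨p, List.mem_filter.mpr ⟨hp, by simpa using hv⟩, ?_⟩
      have hk : p.1 ≠ [] := by
        fin_cases hp <;> simp
      exact (pvKwBridge p.1 hk t).mp ⟨i, hi, hc⟩
    · rintro ⟨p, hp, hin⟩
      have hp' := List.mem_filter.mp hp
      have hk : p.1 ≠ [] := by
        have := hp'.1; fin_cases this <;> simp
      obtain ⟨i, hi, hs⟩ := (pvKwBridge p.1 hk t).mpr hin
      exact ⟨(i, p), (hmem _).mpr ⟨hi, hp'.1⟩, hs, by simpa using hp'.2⟩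
  -- name the five booleans of A's ladder
  have key : ∀ g : Nat, g < 5 →
      ((∃ q ∈ pairs, PySem.Chars.startswith (t.drop q.1) q.2.1 = true ∧ q.2.2 = g)
        ↔ ∃ kw ∈ pvFlat.filter (fun p => p.2 = g), PySem.Chars.isIn kw.1 t = true) := hmatch
  -- upper bounds: if group g matches then m ≤ g
  have hub : ∀ g : Nat, g < 5 →
      (∃ kw ∈ pvFlat.filter (fun p => p.2 = g), PySem.Chars.isIn kw.1 t = true) → m ≤ g := by
    intro g hg hgm
    obtain ⟨q, hq, hc, hv⟩ := (key g hg).mpr hgm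
    have := hmin q hq hc
    omega
  -- value: m < 5 → group m matches
  have hvm : m < 5 → ∃ kw ∈ pvFlat.filter (fun p => p.2 = m), PySem.Chars.isIn kw.1 t = true := by
    intro h5
    rcases hval with h | ⟨q, hq, hc, hv⟩
    · omega
    · exact (key m h5).mp ⟨q, hq, hc, hv⟩
  -- expand the group filters (pvFlat is a literal list)
  have e0 : (pvFlat.filter (fun p => p.2 = 0)) = [("cpu".toList, 0), ("processor".toList, 0), ("load".toList, 0)] := by rfl
  have e1 : (pvFlat.filter (fun p => p.2 = 1)) = [("memory".toList, 1), ("ram".toList, 1), ("swap".toList, 1), ("oom".toList, 1)] := by rfl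
  have e2 : (pvFlat.filter (fun p => p.2 = 2)) = [("disk".toList, 2), ("storage".toList, 2), ("space".toList, 2), ("inode".toList, 2)] := by rfl
  have e3 : (pvFlat.filter (fun p => p.2 = 3)) = [("process".toList, 3), ("service".toList, 3), ("application".toList, 3), ("pid".toList, 3)] := by rfl
  have e4 : (pvFlat.filter (fun p => p.2 = 4)) = [("health".toList, 4), ("status".toList, 4), ("overall".toList, 4)] := by rfl
  -- each ladder test is equivalent to "its group has a match"
  have c0 : ((["cpu", "processor", "load"].any (fun k => PySem.Str.isIn k tl)) = true
      ↔ ∃ kw ∈ pvFlat.filter (fun p => p.2 = 0), PySem.Chars.isIn kw.1 t = true) := by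
    rw [e0]; simp [← ht]
  have c1 : ((["memory", "ram", "swap", "oom"].any (fun k => PySem.Str.isIn k tl)) = true
      ↔ ∃ kw ∈ pvFlat.filter (fun p => p.2 = 1), PySem.Chars.isIn kw.1 t = true) := by
    rw [e1]; simp [← ht]
  have c2 : ((["disk", "storage", "space", "inode"].any (fun k => PySem.Str.isIn k tl)) = true
      ↔ ∃ kw ∈ pvFlat.filter (fun p => p.2 = 2), PySem.Chars.isIn kw.1 t = true) := by
    rw [e2]; simp [← ht]
  have c3 : ((["process", "service", "application", "pid"].any (fun k => PySem.Str.isIn k tl)) = true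
      ↔ ∃ kw ∈ pvFlat.filter (fun p => p.2 = 3), PySem.Chars.isIn kw.1 t = true) := by
    rw [e3]; simp [← ht]
  have c4 : ((["health", "status", "overall"].any (fun k => PySem.Str.isIn k tl)) = true
      ↔ ∃ kw ∈ pvFlat.filter (fun p => p.2 = 4), PySem.Chars.isIn kw.1 t = true) := by
    rw [e4]; simp [← ht]
  -- m ≤ 5, so six cases
  interval_cases m
  · have h0 := c0.mpr (hvm (by omega))
    rw [if_pos h0]
    rfl
  · have h1 := c1.mpr (hvm (by omega))
    have h0 : ((["cpu", "processor", "load"].any (fun k => PySem.Str.isIn k tl)) = false) := by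
      by_contra h
      have := hub 0 (by omega) (c0.mp (by revert h; cases (["cpu", "processor", "load"].any (fun k => PySem.Str.isIn k tl)) <;> simp))
      omega
    rw [if_neg (by simp only [Bool.not_eq_true]; exact h0), if_pos h1]
    rfl
  · have h2 := c2.mpr (hvm (by omega))
    have h0 : ((["cpu", "processor", "load"].any (fun k => PySem.Str.isIn k tl)) = false) := by
      by_contra h
      have := hub 0 (by omega) (c0.mp (by revert h; cases (["cpu", "processor", "load"].any (fun k => PySem.Str.isIn k tl)) <;> simp))
      omega
    have h1 : ((["memory", "ram", "swap", "oom"].any (fun k => PySem.Str.isIn k tl)) = false) := by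
      by_contra h
      have := hub 1 (by omega) (c1.mp (by revert h; cases (["memory", "ram", "swap", "oom"].any (fun k => PySem.Str.isIn k tl)) <;> simp))
      omega
    rw [if_neg (by simp only [Bool.not_eq_true]; exact h0), if_neg (by simp only [Bool.not_eq_true]; exact h1), if_pos h2]
    rfl
  · have h3 := c3.mpr (hvm (by omega))
    have h0 : ((["cpu", "processor", "load"].any (fun k => PySem.Str.isIn k tl)) = false) := by
      by_contra h
      have := hub 0 (by omega) (c0.mp (by revert h; cases (["cpu", "processor", "load"].any (fun k => PySem.Str.isIn k tl)) <;> simp))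
      omega
    have h1 : ((["memory", "ram", "swap", "oom"].any (fun k => PySem.Str.isIn k tl)) = false) := by
      by_contra h
      have := hub 1 (by omega) (c1.mp (by revert h; cases (["memory", "ram", "swap", "oom"].any (fun k => PySem.Str.isIn k tl)) <;> simp))
      omega
    have h2 : ((["disk", "storage", "space", "inode"].any (fun k => PySem.Str.isIn k tl)) = false) := by
      by_contra h
      have := hub 2 (by omega) (c2.mp (by revert h; cases (["disk", "storage", "space", "inode"].any (fun k => PySem.Str.isIn k tl)) <;> simp))
      omega
    rw [if_neg (by simp only [Bool.not_eq_true]; exact h0), if_neg (by simp only [Bool.not_eq_true]; exact h1), if_neg (by simp only [Bool.not_eq_true]; exact h2), if_pos h3]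
    rfl
  · have h4 := c4.mpr (hvm (by omega))
    have h0 : ((["cpu", "processor", "load"].any (fun k => PySem.Str.isIn k tl)) = false) := by
      by_contra h
      have := hub 0 (by omega) (c0.mp (by revert h; cases (["cpu", "processor", "load"].any (fun k => PySem.Str.isIn k tl)) <;> simp))
      omega
    have h1 : ((["memory", "ram", "swap", "oom"].any (fun k => PySem.Str.isIn k tl)) = false) := by
      by_contra h
      have := hub 1 (by omega) (c1.mp (by revert h; cases (["memory", "ram", "swap", "oom"].any (fun k => PySem.Str.isIn k tl)) <;> simp))
      omega
    have h2 : ((["disk", "storage", "space", "inode"].any (fun k => PySem.Str.isIn k tl)) = false) := by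
      by_contra h
      have := hub 2 (by omega) (c2.mp (by revert h; cases (["disk", "storage", "space", "inode"].any (fun k => PySem.Str.isIn k tl)) <;> simp))
      omega
    have h3 : ((["process", "service", "application", "pid"].any (fun k => PySem.Str.isIn k tl)) = false) := by
      by_contra h
      have := hub 3 (by omega) (c3.mp (by revert h; cases (["process", "service", "application", "pid"].any (fun k => PySem.Str.isIn k tl)) <;> simp))
      omega
    rw [if_neg (by simp only [Bool.not_eq_true]; exact h0), if_neg (by simp only [Bool.not_eq_true]; exact h1), if_neg (by simp only [Bool.not_eq_true]; exact h2), if_neg (by simp only [Bool.not_eq_true]; exact h3), if_pos h4]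
    rfl
  · have h0 : ((["cpu", "processor", "load"].any (fun k => PySem.Str.isIn k tl)) = false) := by
      by_contra h
      have := hub 0 (by omega) (c0.mp (by revert h; cases (["cpu", "processor", "load"].any (fun k => PySem.Str.isIn k tl)) <;> simp))
      omega
    have h1 : ((["memory", "ram", "swap", "oom"].any (fun k => PySem.Str.isIn k tl)) = false) := by
      by_contra h
      have := hub 1 (by omega) (c1.mp (by revert h; cases (["memory", "ram", "swap", "oom"].any (fun k => PySem.Str.isIn k tl)) <;> simp))
      omega
    have h2 : ((["disk", "storage", "space", "inode"].any (fun k => PySem.Str.isIn k tl)) = false) := by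
      by_contra h
      have := hub 2 (by omega) (c2.mp (by revert h; cases (["disk", "storage", "space", "inode"].any (fun k => PySem.Str.isIn k tl)) <;> simp))
      omega
    have h3 : ((["process", "service", "application", "pid"].any (fun k => PySem.Str.isIn k tl)) = false) := by
      by_contra h
      have := hub 3 (by omega) (c3.mp (by revert h; cases (["process", "service", "application", "pid"].any (fun k => PySem.Str.isIn k tl)) <;> simp))
      omega
    have h4 : ((["health", "status", "overall"].any (fun k => PySem.Str.isIn k tl)) = false) := by
      by_contra h
      have := hub 4 (by omega) (c4.mp (by revert h; cases (["health", "status", "overall"].any (fun k => PySem.Str.isIn k tl)) <;> simp))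
      omega
    rw [if_neg (by simp only [Bool.not_eq_true]; exact h0), if_neg (by simp only [Bool.not_eq_true]; exact h1), if_neg (by simp only [Bool.not_eq_true]; exact h2), if_neg (by simp only [Bool.not_eq_true]; exact h3), if_neg (by simp only [Bool.not_eq_true]; exact h4)]
    rfl

-- ===== VERDICT (by name: the statement is the Claim_ definition above) =====
theorem identify_monitoring_type_py_spec : Claim_equal_identify_monitoring_type_py := by
  intro task _
  unfold Spec_identify_monitoring_type_py
  exact (identify_monitoring_type_py_alt_eq task).symm
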